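-- pv_equiv track=rewrite | github.com/Singh-Diljit/primes | unittests/test_strongLucas.py | slowLucas
-- ===== SOURCE A (Python) =====
-- def slowLucas(P, Q, k):
--     """Generate the k+1 term of U, V (k >= 2 and even) taken mod(k-1)."""
--     m = k-1
--     U = [0, 1]
--     V = [2, P]
--     iterate = lambda seq: P*seq[1] - Q*seq[0]
--     for i in range(2, k+1):
--         U = [U[1], iterate(U)]
--         V = [V[1], iterate(V)]
--
--     return U[1]%m, V[1]%m
-- ===== SOURCE B (Python) =====
-- def slowLucas(P, Q, k):
--     """Same result as A, but via 2x2 matrix exponentiation mod m = k-1: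
--     M = [[P,-Q],[1,0]], M^n * (x1,x0) = (x_{n+1}, x_n) for any sequence with
--     x_{j+2} = P*x_{j+1} - Q*x_j; all arithmetic reduced mod m throughout."""
--     m = k - 1
--     e = k - 1 if k >= 2 else 0  # target index is e+1 (U_1, V_1 when no loop runs in A)
--
--     def mul(X, Y):
--         a, b, c, d = X
--         w, x, y, z = Y
--         return ((a*w + b*y) % m, (a*x + b*z) % m,
--                 (c*w + d*y) % m, (c*x + d*z) % m)
--
--     R = (1, 0, 0, 1)
--     M = (P, -Q, 1, 0)
--     while e > 0:
--         if e % 2 == 1: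
--             R = mul(M, R)
--         M = mul(M, M)
--         e //= 2
--
--     a, b = R[0], R[1]
--     return a % m, (a*P + b*2) % m
-- ===== Notes on version B (the rewrite author's own statement) =====
-- stated objective: faster
-- what changed: A iterates the Lucas recurrence term by term in O(k) with unbounded integers; B computes the k-th terms by binary exponentiation of the 2x2 companion matrix [[P,-Q],[1,0]] with every entry reduced mod m = k-1 throughout, in O(log k) multiplications on bounded operands.
import Mathlib
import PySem

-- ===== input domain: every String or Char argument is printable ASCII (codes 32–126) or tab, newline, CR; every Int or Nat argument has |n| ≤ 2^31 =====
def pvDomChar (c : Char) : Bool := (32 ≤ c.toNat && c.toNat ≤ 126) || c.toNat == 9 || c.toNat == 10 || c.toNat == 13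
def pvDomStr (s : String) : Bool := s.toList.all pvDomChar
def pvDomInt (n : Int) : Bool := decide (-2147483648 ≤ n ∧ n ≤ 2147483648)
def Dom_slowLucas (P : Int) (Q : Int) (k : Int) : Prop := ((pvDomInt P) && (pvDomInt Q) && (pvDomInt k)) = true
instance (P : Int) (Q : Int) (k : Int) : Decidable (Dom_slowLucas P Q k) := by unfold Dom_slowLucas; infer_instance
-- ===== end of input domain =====

-- B replaces A's O(k) linear recurrence loop by 2x2 matrix binary exponentiation mod m = k-1 (O(log k) steps).

-- ===== PORT A =====
def slowStep (P Q : Int) (st : Int × Int × Int × Int) : Int × Int × Int × Int :=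
  (st.2.1, P * st.2.1 - Q * st.1, st.2.2.2, P * st.2.2.2 - Q * st.2.2.1)

def slowLucas (P : Int) (Q : Int) (k : Int) : List Int :=
  let m := k - 1
  let st := (PySem.List.pyRange 2 (k + 1) 1).foldl (fun s _ => slowStep P Q s) (0, 1, 2, P)
  [PySem.Int.mod st.2.1 m, PySem.Int.mod st.2.2.2 m]

-- ===== PORT B =====
abbrev Mat4 := Int × Int × Int × Int

def mulM (m : Int) (X Y : Mat4) : Mat4 :=
  (PySem.Int.mod (X.1 * Y.1 + X.2.1 * Y.2.2.1) m,
   PySem.Int.mod (X.1 * Y.2.1 + X.2.1 * Y.2.2.2) m,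
   PySem.Int.mod (X.2.2.1 * Y.1 + X.2.2.2 * Y.2.2.1) m,
   PySem.Int.mod (X.2.2.1 * Y.2.1 + X.2.2.2 * Y.2.2.2) m)

def powLoop (m : Int) (R M : Mat4) (e : Nat) : Mat4 :=
  if h : e = 0 then R
  else powLoop m (if e % 2 = 1 then mulM m M R else R) (mulM m M M) (e / 2)
termination_by e
decreasing_by exact Nat.div_lt_self (Nat.pos_of_ne_zero h) one_lt_two

def slowLucas_alt (P : Int) (Q : Int) (k : Int) : List Int :=
  let m := k - 1
  let e : Nat := if 2 ≤ k then (k - 1).toNat else 0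
  let E := powLoop m (1, 0, 0, 1) (P, -Q, 1, 0) e
  [PySem.Int.mod E.1 m, PySem.Int.mod (E.1 * P + E.2.1 * 2) m]

-- ===== PRECONDITION & SPEC =====
-- Pre_ excludes exactly k = 1, where Python A divides ('%') by m = 0 and raises ZeroDivisionError (B does too).
def Pre_slowLucas (P : Int) (Q : Int) (k : Int) : Prop := k ≠ 1
instance (P : Int) (Q : Int) (k : Int) : Decidable (Pre_slowLucas P Q k) := by unfold Pre_slowLucas; infer_instance

def pvWitness_slowLucas : Int × Int × Int := (1, 1, 6)

def Spec_slowLucas (P : Int) (Q : Int) (k : Int) (out : List Int) : Prop := out = slowLucas_alt P Q k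
instance (P : Int) (Q : Int) (k : Int) (out : List Int) : Decidable (Spec_slowLucas P Q k out) := by unfold Spec_slowLucas; infer_instance

-- ===== CLAIM (what is proved, stated in full; the proofs are below) =====
def Claim_equal_slowLucas : Prop := ∀ (P : Int) (Q : Int) (k : Int), Dom_slowLucas P Q k → Pre_slowLucas P Q k → Spec_slowLucas P Q k (slowLucas P Q k)

-- ===== LEMMAS AND PROOFS =====

-- the linear recurrence x_{n+2} = P*x_{n+1} - Q*x_n with seeds x0, x1
def lucSeq (P Q x0 x1 : Int) : Nat → Int
  | 0 => x0
  | 1 => x1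
  | (n + 2) => P * lucSeq P Q x0 x1 (n + 1) - Q * lucSeq P Q x0 x1 n

-- exact (un-reduced) matrix product and left-power
def mulE (X Y : Mat4) : Mat4 :=
  (X.1 * Y.1 + X.2.1 * Y.2.2.1, X.1 * Y.2.1 + X.2.1 * Y.2.2.2,
   X.2.2.1 * Y.1 + X.2.2.2 * Y.2.2.1, X.2.2.1 * Y.2.1 + X.2.2.2 * Y.2.2.2)

def powE (M : Mat4) : Nat → Mat4
  | 0 => (1, 0, 0, 1)
  | (n + 1) => mulE M (powE M n)

-- entrywise congruence mod m
def RelM (m : Int) (X Y : Mat4) : Prop :=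
  X.1.fmod m = Y.1.fmod m ∧ X.2.1.fmod m = Y.2.1.fmod m ∧
  X.2.2.1.fmod m = Y.2.2.1.fmod m ∧ X.2.2.2.fmod m = Y.2.2.2.fmod m

theorem RelM_refl (m : Int) (X : Mat4) : RelM m X X := ⟨rfl, rfl, rfl, rfl⟩

theorem fmod_comb (m a b c d a' b' c' d' : Int)
    (h1 : a.fmod m = a'.fmod m) (h2 : b.fmod m = b'.fmod m)
    (h3 : c.fmod m = c'.fmod m) (h4 : d.fmod m = d'.fmod m) :
    (a * b + c * d).fmod m = (a' * b' + c' * d').fmod m := by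
  rw [Int.add_fmod, Int.mul_fmod, Int.mul_fmod c, h1, h2, h3, h4,
    ← Int.mul_fmod, ← Int.mul_fmod, ← Int.add_fmod]

theorem mulM_rel (m : Int) (X Y X' Y' : Mat4) (hX : RelM m X X') (hY : RelM m Y Y') :
    RelM m (mulM m X Y) (mulE X' Y') := by
  obtain ⟨x1, x2, x3, x4⟩ := hX
  obtain ⟨y1, y2, y3, y4⟩ := hY
  refine ⟨?_, ?_, ?_, ?_⟩ <;>
    simp only [mulM, mulE, PySem.Int.mod, Int.fmod_fmod] <;>
    exact fmod_comb m _ _ _ _ _ _ _ _ (by assumption) (by assumption) (by assumption) (by assumption)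

theorem mulE_assoc (X Y Z : Mat4) : mulE (mulE X Y) Z = mulE X (mulE Y Z) := by
  obtain ⟨a, b, c, d⟩ := X; obtain ⟨e, f, g, h⟩ := Y; obtain ⟨i, j, l, n⟩ := Z
  simp only [mulE, Prod.mk.injEq]
  refine ⟨by ring, by ring, by ring, by ring⟩

theorem mulE_one (X : Mat4) : mulE X (1, 0, 0, 1) = X := by
  obtain ⟨a, b, c, d⟩ := X
  simp only [mulE, Prod.mk.injEq]
  refine ⟨by ring, by ring, by ring, by ring⟩

theorem one_mulE (X : Mat4) : mulE (1, 0, 0, 1) X = X := by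
  obtain ⟨a, b, c, d⟩ := X
  simp only [mulE, Prod.mk.injEq]
  refine ⟨by ring, by ring, by ring, by ring⟩

theorem powE_add (M : Mat4) (a b : Nat) :
    powE M (a + b) = mulE (powE M a) (powE M b) := by
  induction a with
  | zero => simp [powE, one_mulE]
  | succ a ih =>
    have : a + 1 + b = (a + b) + 1 := by omega
    rw [this, powE, ih, powE, mulE_assoc]

theorem powE_sq (M : Mat4) (q : Nat) : powE (mulE M M) q = powE M (2 * q) := by
  induction q with
  | zero => simp [powE]
  | succ q ih =>
    have h2 : 2 * (q + 1) = (2 * q) + 1 + 1 := by omega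
    rw [powE, ih, h2, powE, powE, ← mulE_assoc]

theorem powE_one (M : Mat4) : powE M 1 = M := by
  rw [powE, powE, mulE_one]

theorem powE_succ_right (M : Mat4) (n : Nat) : mulE (powE M n) M = powE M (n + 1) := by
  have h := powE_add M n 1
  rw [powE_one] at h
  exact h.symm

theorem powLoop_rel (m : Int) (e : Nat) : ∀ (R M R' M' : Mat4),
    RelM m R R' → RelM m M M' → RelM m (powLoop m R M e) (mulE (powE M' e) R') := by
  induction e using Nat.strong_induction_on with
  | _ e ih =>
    intro R M R' M' hR hM
    rw [powLoop]
    by_cases h0 : e = 0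
    · subst h0; simpa [powE, one_mulE] using hR
    · simp only [h0, dite_false]
      have hlt : e / 2 < e := Nat.div_lt_self (Nat.pos_of_ne_zero h0) one_lt_two
      have hM2 : RelM m (mulM m M M) (mulE M' M') := mulM_rel m _ _ _ _ hM hM
      by_cases hpar : e % 2 = 1
      · have hR2 : RelM m (mulM m M R) (mulE M' R') := mulM_rel m _ _ _ _ hM hR
        have := ih (e / 2) hlt (mulM m M R) (mulM m M M) (mulE M' R') (mulE M' M') hR2 hM2
        simp only [hpar, if_true] at this ⊢
        have heq : mulE (powE (mulE M' M') (e / 2)) (mulE M' R') = mulE (powE M' e) R' := by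
          rw [powE_sq, ← mulE_assoc, powE_succ_right]
          congr 2
          omega
        rwa [heq] at this
      · have := ih (e / 2) hlt R (mulM m M M) R' (mulE M' M') hR hM2
        simp only [hpar, if_false] at this ⊢
        have heq : powE (mulE M' M') (e / 2) = powE M' e := by
          rw [powE_sq]
          congr 1
          omega
        rwa [heq] at this

theorem powE_apply (P Q x0 x1 : Int) (n : Nat) :
    (powE (P, -Q, 1, 0) n).1 * x1 + (powE (P, -Q, 1, 0) n).2.1 * x0
      = lucSeq P Q x0 x1 (n + 1)
  ∧ (powE (P, -Q, 1, 0) n).2.2.1 * x1 + (powE (P, -Q, 1, 0) n).2.2.2 * x0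
      = lucSeq P Q x0 x1 n := by
  induction n with
  | zero => simp [powE, lucSeq]
  | succ n ih =>
    obtain ⟨ih1, ih2⟩ := ih
    constructor
    · show (P * (powE (P, -Q, 1, 0) n).1 + -Q * (powE (P, -Q, 1, 0) n).2.2.1) * x1
        + (P * (powE (P, -Q, 1, 0) n).2.1 + -Q * (powE (P, -Q, 1, 0) n).2.2.2) * x0
        = lucSeq P Q x0 x1 (n + 2)
      rw [show lucSeq P Q x0 x1 (n + 2)
          = P * lucSeq P Q x0 x1 (n + 1) - Q * lucSeq P Q x0 x1 n from rfl]
      linear_combination P * ih1 - Q * ih2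
    · show (1 * (powE (P, -Q, 1, 0) n).1 + 0 * (powE (P, -Q, 1, 0) n).2.2.1) * x1
        + (1 * (powE (P, -Q, 1, 0) n).2.1 + 0 * (powE (P, -Q, 1, 0) n).2.2.2) * x0
        = lucSeq P Q x0 x1 (n + 1)
      linear_combination ih1

theorem foldl_const_step {α : Type} (f : α → α) (l : List Int) (s : α) :
    l.foldl (fun s _ => f s) s = f^[l.length] s := by
  induction l generalizing s with
  | nil => rfl
  | cons x l ih => simp [List.foldl_cons, ih, Function.iterate_succ_apply]

theorem iter_luc (P Q : Int) (n j : Nat) :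
    (fun s => slowStep P Q s)^[n]
      (lucSeq P Q 0 1 j, lucSeq P Q 0 1 (j + 1), lucSeq P Q 2 P j, lucSeq P Q 2 P (j + 1))
    = (lucSeq P Q 0 1 (j + n), lucSeq P Q 0 1 (j + n + 1),
       lucSeq P Q 2 P (j + n), lucSeq P Q 2 P (j + n + 1)) := by
  induction n generalizing j with
  | zero => rfl
  | succ n ih =>
    rw [Function.iterate_succ_apply]
    have hstep : slowStep P Q
        (lucSeq P Q 0 1 j, lucSeq P Q 0 1 (j + 1), lucSeq P Q 2 P j, lucSeq P Q 2 P (j + 1))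
      = (lucSeq P Q 0 1 (j + 1), lucSeq P Q 0 1 (j + 1 + 1),
         lucSeq P Q 2 P (j + 1), lucSeq P Q 2 P (j + 1 + 1)) := by
      simp only [slowStep]
      rw [show lucSeq P Q 0 1 (j + 1 + 1) = P * lucSeq P Q 0 1 (j + 1) - Q * lucSeq P Q 0 1 j from rfl,
          show lucSeq P Q 2 P (j + 1 + 1) = P * lucSeq P Q 2 P (j + 1) - Q * lucSeq P Q 2 P j from rfl]
    rw [hstep, ih (j + 1)]
    have h1 : j + 1 + n = j + (n + 1) := by omega
    rw [h1]

theorem slowLucas_eq_luc (P Q k : Int) :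
    slowLucas P Q k
    = [PySem.Int.mod (lucSeq P Q 0 1 ((k + 1 - 2).toNat + 1)) (k - 1),
       PySem.Int.mod (lucSeq P Q 2 P ((k + 1 - 2).toNat + 1)) (k - 1)] := by
  simp only [slowLucas]
  rw [foldl_const_step, PySem.List.length_pyRange_one]
  have h0 : (0 : Int) = lucSeq P Q 0 1 0 := rfl
  have h1 : (1 : Int) = lucSeq P Q 0 1 1 := rfl
  have h2 : (2 : Int) = lucSeq P Q 2 P 0 := rfl
  have h3 : P = lucSeq P Q 2 P 1 := rfl
  rw [show ((0 : Int), (1 : Int), (2 : Int), P)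
      = (lucSeq P Q 0 1 0, lucSeq P Q 0 1 (0 + 1), lucSeq P Q 2 P 0, lucSeq P Q 2 P (0 + 1)) from rfl,
    iter_luc]
  simp

-- ===== VERDICT (by name: the statement is the Claim_ definition above) =====
theorem slowLucas_spec : Claim_equal_slowLucas := by
  intro P Q k _ _
  show slowLucas P Q k = slowLucas_alt P Q k
  rw [slowLucas_eq_luc]
  simp only [slowLucas_alt]
  set m := k - 1 with hm
  by_cases hk : 2 ≤ k
  · simp only [hk, if_true]
    set e : Nat := (k - 1).toNat with he
    have hlen : (k + 1 - 2).toNat = e := by omega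
    rw [hlen]
    have hrel := powLoop_rel m e (1, 0, 0, 1) (P, -Q, 1, 0) (1, 0, 0, 1) (P, -Q, 1, 0)
      (RelM_refl m _) (RelM_refl m _)
    rw [mulE_one] at hrel
    obtain ⟨r1, r2, _, _⟩ := hrel
    set E := powLoop m (1, 0, 0, 1) (P, -Q, 1, 0) e with hE
    have hU := (powE_apply P Q 0 1 e).1
    have hV := (powE_apply P Q 2 P e).1
    simp only [PySem.Int.mod]
    congr 1
    · rw [← hU]
      have : ((powE (P, -Q, 1, 0) e).1 * 1 + (powE (P, -Q, 1, 0) e).2.1 * 0)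
          = (powE (P, -Q, 1, 0) e).1 := by ring
      rw [this, ← r1]
    · congr 1
      rw [← hV]
      exact fmod_comb m _ _ _ _ _ _ _ _ r1.symm rfl r2.symm rfl
  · simp only [hk, if_false]
    have hnil : (k + 1 - 2).toNat = 0 := by omega
    have hpl : powLoop m (1, 0, 0, 1) (P, -Q, 1, 0) 0 = (1, 0, 0, 1) := by
      rw [powLoop]
      simp
    rw [hnil, hpl]
    have hP : (1 : Int) * P + 0 * 2 = P := by ring
    simp only [PySem.Int.mod]
    rw [show lucSeq P Q 0 1 (0 + 1) = 1 from rfl, show lucSeq P Q 2 P (0 + 1) = P from rfl, hP]
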